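-- pv_equiv track=rewrite | github.com/ASSERT-KTH/styler | src/styler.py | get_batch_results
-- ===== SOURCE A (Python) =====
-- def get_batch_results(checkstyle_results, n_batch=5):
--     return {
--         batch:{
--             file.split('/')[-3]:len(result['violations'])
--             for file, result in checkstyle_results.items()
--             if f'batch_{batch}' == file.split('/')[-2]
--         }
--         for batch in range(n_batch)
--     }
-- ===== SOURCE B (Python) =====
-- def get_batch_results(checkstyle_results, n_batch=5):
--     # One pass over the files with a precomputed batch-name index,
--     # instead of rescanning all files once per batch.
--     result = {batch: {} for batch in range(n_batch)}
--     if n_batch <= 0: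
--         return result
--     index = {f'batch_{batch}': batch for batch in range(n_batch)}
--     for file, res in checkstyle_results.items():
--         parts = file.split('/')
--         batch = index.get(parts[-2])
--         if batch is not None:
--             result[batch][parts[-3]] = len(res['violations'])
--     return result
-- ===== Notes on version B (the rewrite author's own statement) =====
-- stated objective: faster
-- what changed: A rebuilds each batch's dict by rescanning every file once per batch; B makes a single pass over the files, routing each file to its batch via a precomputed {'batch_k': k} index into a pre-initialized result table.
import Mathlib
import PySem

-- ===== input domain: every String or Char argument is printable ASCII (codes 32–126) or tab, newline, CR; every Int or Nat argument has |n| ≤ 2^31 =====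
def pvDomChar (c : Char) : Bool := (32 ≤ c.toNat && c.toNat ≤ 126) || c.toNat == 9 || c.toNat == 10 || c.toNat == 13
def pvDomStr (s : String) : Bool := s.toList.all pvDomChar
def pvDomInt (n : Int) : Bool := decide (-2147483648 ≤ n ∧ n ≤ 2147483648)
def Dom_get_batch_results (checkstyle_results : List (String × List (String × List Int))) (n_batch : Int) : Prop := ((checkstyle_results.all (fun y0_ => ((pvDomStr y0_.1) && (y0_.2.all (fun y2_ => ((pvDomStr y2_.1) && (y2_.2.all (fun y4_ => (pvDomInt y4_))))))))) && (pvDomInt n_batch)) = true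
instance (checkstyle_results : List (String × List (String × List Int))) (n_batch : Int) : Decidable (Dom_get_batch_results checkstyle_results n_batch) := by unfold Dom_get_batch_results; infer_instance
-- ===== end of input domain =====

-- B replaces A's per-batch rescan of all files by one pass over the files with a
-- precomputed {'batch_k': k} index (objective: faster, O(n_batch*files) → O(n_batch+files)).

-- ===== PORT A =====
-- body of A's inner dict comprehension, one checkstyle entry at a time
def pvAStep (batch : Int) (d : PySem.Dict String Int)
    (p : String × List (String × List Int)) : PySem.Dict String Int :=
  let parts := (PySem.Str.split? p.1 "/").getD []
  if ("batch_" ++ PySem.Int.toStr batch) == PySem.List.pyGetD parts (-2) "" then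
    d.insert (PySem.List.pyGetD parts (-3) "")
      (((PySem.Dict.mk p.2).getD "violations" []).length : Int)
  else d

def get_batch_results (checkstyle_results : List (String × List (String × List Int))) (n_batch : Int) : List (Int × List (String × Int)) :=
  (PySem.List.pyRange 0 n_batch 1).map (fun batch =>
    (batch, (checkstyle_results.foldl (pvAStep batch) (PySem.Dict.mk [])).items))

-- ===== PORT B =====
-- result = {batch: {} for batch in range(n_batch)}
def pvInit (n : Int) : PySem.Dict Int (PySem.Dict String Int) :=
  (PySem.List.pyRange 0 n 1).foldl (fun d b => d.insert b (PySem.Dict.mk [])) (PySem.Dict.mk [])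

-- index = {f'batch_{batch}': batch for batch in range(n_batch)}
def pvIndex (n : Int) : PySem.Dict String Int :=
  (PySem.List.pyRange 0 n 1).foldl (fun d b => d.insert ("batch_" ++ PySem.Int.toStr b) b) (PySem.Dict.mk [])

-- body of B's single pass over the files
def pvBStep (index : PySem.Dict String Int)
    (res : PySem.Dict Int (PySem.Dict String Int))
    (p : String × List (String × List Int)) : PySem.Dict Int (PySem.Dict String Int) :=
  let parts := (PySem.Str.split? p.1 "/").getD []
  match index.get? (PySem.List.pyGetD parts (-2) "") with
  | none => res
  | some batch =>
      res.modify batch (PySem.Dict.mk [])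
        (fun d => d.insert (PySem.List.pyGetD parts (-3) "")
          (((PySem.Dict.mk p.2).getD "violations" []).length : Int))

def get_batch_results_alt (checkstyle_results : List (String × List (String × List Int))) (n_batch : Int) : List (Int × List (String × Int)) :=
  if n_batch ≤ 0 then
    (pvInit n_batch).items.map (fun q => (q.1, q.2.items))
  else
    ((checkstyle_results.foldl (pvBStep (pvIndex n_batch)) (pvInit n_batch)).items.map
      (fun q => (q.1, q.2.items)))

-- ===== PRECONDITION & SPEC =====
-- does s equal 'batch_<k>' for some 0 ≤ k < n (canonical decimal, no sign/leading zeros)?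
def pvIsBatchSeg (n : Int) (s : String) : Bool :=
  PySem.Str.startswith s "batch_" &&
  (let rest := s.toList.drop 6
   !(rest.isEmpty) && rest.all (fun c => decide ('0' ≤ c) && decide (c ≤ '9')) &&
   (rest.head? != some '0' || rest == ['0']) &&
   decide (((rest.foldl (fun a c => 10 * a + (c.toNat - 48)) 0 : Nat) : Int) < n))

-- Pre_ = exactly the inputs where Python A returns: the association list represents a dict
-- (distinct keys), and — when some batch exists — every path splits into ≥ 2 segments
-- (else IndexError at [-2]); a path whose parent segment names a real batch must have
-- ≥ 3 segments (else IndexError at [-3]) and its result must carry 'violations' (else KeyError).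
def Pre_get_batch_results (checkstyle_results : List (String × List (String × List Int))) (n_batch : Int) : Prop :=
  (checkstyle_results.map Prod.fst).Nodup ∧
  (0 < n_batch → ∀ p ∈ checkstyle_results,
    2 ≤ ((PySem.Str.split? p.1 "/").getD []).length ∧
    (pvIsBatchSeg n_batch (PySem.List.pyGetD ((PySem.Str.split? p.1 "/").getD []) (-2) "") = true →
      3 ≤ ((PySem.Str.split? p.1 "/").getD []).length ∧ "violations" ∈ p.2.map Prod.fst))
instance (checkstyle_results : List (String × List (String × List Int))) (n_batch : Int) : Decidable (Pre_get_batch_results checkstyle_results n_batch) := by unfold Pre_get_batch_results; infer_instance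

def pvWitness_get_batch_results : (List (String × List (String × List Int))) × Int :=
  ([("repo/x/batch_0/f.java", [("violations", [1, 2])]), ("repo/y/batch_7/g.java", [])], 2)

def Spec_get_batch_results (checkstyle_results : List (String × List (String × List Int))) (n_batch : Int) (out : List (Int × List (String × Int))) : Prop := out = get_batch_results_alt checkstyle_results n_batch
instance (checkstyle_results : List (String × List (String × List Int))) (n_batch : Int) (out : List (Int × List (String × Int))) : Decidable (Spec_get_batch_results checkstyle_results n_batch out) := by unfold Spec_get_batch_results; infer_instance

-- ===== CLAIM (what is proved, stated in full; the proofs are below) =====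
def Claim_equal_get_batch_results : Prop := ∀ (checkstyle_results : List (String × List (String × List Int))) (n_batch : Int), Dom_get_batch_results checkstyle_results n_batch → Pre_get_batch_results checkstyle_results n_batch → Spec_get_batch_results checkstyle_results n_batch (get_batch_results checkstyle_results n_batch)

-- ===== LEMMAS AND PROOFS =====

theorem pv_digitChar_inj (a b : Nat) (ha : a < 10) (hb : b < 10)
    (h : Nat.digitChar a = Nat.digitChar b) : a = b := by
  interval_cases a <;> interval_cases b <;> simp_all [Nat.digitChar]

theorem pv_toDigits_ne_nil (n : Nat) : Nat.toDigits 10 n ≠ [] := by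
  rcases lt_or_ge n 10 with h | h
  · rw [Nat.toDigits_of_lt_base h]; simp
  · rw [Nat.toDigits_of_base_le (by omega) h]; simp

theorem pv_toDigits_inj (a : Nat) : ∀ b, Nat.toDigits 10 a = Nat.toDigits 10 b → a = b := by
  induction a using Nat.strong_induction_on with
  | _ a ih =>
    intro b h
    rcases lt_or_ge a 10 with hA | hA <;> rcases lt_or_ge b 10 with hB | hB
    · rw [Nat.toDigits_of_lt_base hA, Nat.toDigits_of_lt_base hB] at h
      exact pv_digitChar_inj a b hA hB (by simpa using h)
    · exfalso
      rw [Nat.toDigits_of_lt_base hA, Nat.toDigits_of_base_le (by omega) hB] at h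
      have hl := congrArg List.length h
      simp only [List.length_cons, List.length_append, List.length_nil] at hl
      exact pv_toDigits_ne_nil (b / 10) (List.length_eq_zero_iff.mp (by omega))
    · exfalso
      rw [Nat.toDigits_of_base_le (by omega) hA, Nat.toDigits_of_lt_base hB] at h
      have hl := congrArg List.length h
      simp only [List.length_cons, List.length_append, List.length_nil] at hl
      exact pv_toDigits_ne_nil (a / 10) (List.length_eq_zero_iff.mp (by omega))
    · rw [Nat.toDigits_of_base_le (by omega) hA, Nat.toDigits_of_base_le (by omega) hB] at h
      have h2 := List.append_inj' h (by rfl)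
      have hq : a / 10 = b / 10 := ih (a / 10) (Nat.div_lt_self (by omega) (by omega)) _ h2.1
      have hr : a % 10 = b % 10 :=
        pv_digitChar_inj _ _ (Nat.mod_lt _ (by omega)) (Nat.mod_lt _ (by omega))
          (by simpa using h2.2)
      omega

theorem pv_key_inj (a b : Int) (ha : 0 ≤ a) (hb : 0 ≤ b)
    (h : ("batch_" ++ PySem.Int.toStr a) = ("batch_" ++ PySem.Int.toStr b)) : a = b := by
  have h1 : ("batch_" ++ PySem.Int.toStr a).toList = ("batch_" ++ PySem.Int.toStr b).toList :=
    congrArg String.toList h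
  rw [String.toList_append, String.toList_append] at h1
  have h2 : (PySem.Int.toStr a).toList = (PySem.Int.toStr b).toList :=
    List.append_cancel_left h1
  rw [PySem.Int.toList_toStr, PySem.Int.toList_toStr] at h2
  unfold PySem.Int.toChars at h2
  rw [if_neg (by omega), if_neg (by omega)] at h2
  have := pv_toDigits_inj a.toNat b.toNat h2
  omega

theorem pv_get?_pvIndex (n : Int) (s : String) :
    (pvIndex n).get? s
      = (PySem.List.pyRange 0 n 1).find? (fun b => ("batch_" ++ PySem.Int.toStr b) == s) := by
  have hnd : ((PySem.List.pyRange 0 n 1).map (fun b => "batch_" ++ PySem.Int.toStr b)).Nodup := by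
    refine List.Nodup.map_on ?_ (PySem.List.nodup_pyRange_one 0 n)
    intro x hx y hy hxy
    have hx0 : 0 ≤ x := ((PySem.List.mem_pyRange_one).1 hx).1
    have hy0 : 0 ≤ y := ((PySem.List.mem_pyRange_one).1 hy).1
    exact pv_key_inj x y hx0 hy0 hxy
  have hitems : (pvIndex n).items
      = (PySem.List.pyRange 0 n 1).map (fun b => ("batch_" ++ PySem.Int.toStr b, b)) := by
    unfold pvIndex
    have := PySem.Dict.items_foldl_insert_fresh (PySem.List.pyRange 0 n 1)
      (fun b => "batch_" ++ PySem.Int.toStr b) (fun b => b) (PySem.Dict.mk [])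
      (fun a _ => rfl) hnd
    simpa using this
  unfold PySem.Dict.get?
  rw [hitems, List.find?_map, Option.map_map]
  have h1 : (((fun p : String × Int => p.1 == s) ∘ fun b : Int => ("batch_" ++ PySem.Int.toStr b, b)))
      = (fun b : Int => ("batch_" ++ PySem.Int.toStr b) == s) := rfl
  have h2 : (((fun x : String × Int => x.2) ∘ fun b : Int => ("batch_" ++ PySem.Int.toStr b, b)))
      = (fun b : Int => b) := rfl
  rw [h1, h2]
  cases (PySem.List.pyRange 0 n 1).find? (fun b : Int => ("batch_" ++ PySem.Int.toStr b) == s) <;> rfl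

theorem pv_pvInit_items (n : Int) :
    (pvInit n).items = (PySem.List.pyRange 0 n 1).map (fun b => (b, PySem.Dict.mk [])) := by
  unfold pvInit
  have := PySem.Dict.items_foldl_insert_fresh (PySem.List.pyRange 0 n 1)
    (fun b => b) (fun _ => PySem.Dict.mk ([] : List (String × Int))) (PySem.Dict.mk [])
    (fun a _ => rfl) (by simpa using PySem.List.nodup_pyRange_one 0 n)
  simpa using this

theorem pv_pvInit_keys (n : Int) : (pvInit n).keys = PySem.List.pyRange 0 n 1 := by
  unfold PySem.Dict.keys
  rw [pv_pvInit_items, List.map_map]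
  exact List.map_id _

theorem pv_pvInit_getD (n : Int) (b : Int) :
    (pvInit n).getD b (PySem.Dict.mk []) = PySem.Dict.mk [] := by
  unfold PySem.Dict.getD PySem.Dict.get?
  rw [pv_pvInit_items, List.find?_map]
  cases hf : (PySem.List.pyRange 0 n 1).find? ((fun p => p.1 == b) ∘ fun x => (x, PySem.Dict.mk [])) with
  | none => rfl
  | some x => rfl

theorem pv_loop_inv (n : Int) (cs : List (String × List (String × List Int))) :
    ∀ (d : PySem.Dict Int (PySem.Dict String Int)), d.keys = PySem.List.pyRange 0 n 1 →
      (cs.foldl (pvBStep (pvIndex n)) d).keys = PySem.List.pyRange 0 n 1 ∧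
      ∀ b ∈ PySem.List.pyRange 0 n 1,
        (cs.foldl (pvBStep (pvIndex n)) d).getD b (PySem.Dict.mk [])
          = cs.foldl (pvAStep b) (d.getD b (PySem.Dict.mk [])) := by
  induction cs with
  | nil => intro d hk; exact ⟨hk, fun b _ => rfl⟩
  | cons p cs ih =>
    intro d hk
    simp only [List.foldl_cons]
    have hstep :
        (pvBStep (pvIndex n) d p).keys = PySem.List.pyRange 0 n 1 ∧
        ∀ b ∈ PySem.List.pyRange 0 n 1,
          (pvBStep (pvIndex n) d p).getD b (PySem.Dict.mk [])
            = pvAStep b (d.getD b (PySem.Dict.mk [])) p := by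
      simp only [pvBStep, pvAStep]
      cases hf : (pvIndex n).get?
          (PySem.List.pyGetD ((PySem.Str.split? p.1 "/").getD []) (-2) "") with
      | none =>
        refine ⟨hk, fun b hb => ?_⟩
        rw [pv_get?_pvIndex, List.find?_eq_none] at hf
        have := hf b hb
        simp only at this ⊢
        rw [if_neg (by simpa using this)]
      | some b0 =>
        have hf' := hf
        rw [pv_get?_pvIndex] at hf'
        have hm := List.mem_of_find?_eq_some hf'
        have hp : (("batch_" ++ PySem.Int.toStr b0)
            == PySem.List.pyGetD ((PySem.Str.split? p.1 "/").getD []) (-2) "") = true := by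
          have := List.find?_some hf'
          simpa using this
        have hb0 := (PySem.List.mem_pyRange_one).1 hm
        constructor
        · rw [PySem.Dict.keys_modify, PySem.Dict.keys_insert_of_contains, hk]
          rw [PySem.Dict.contains_iff_mem_keys, hk]
          exact hm
        · intro b hb
          have hbr := (PySem.List.mem_pyRange_one).1 hb
          rw [PySem.Dict.getD_modify]
          by_cases hbb : b = b0
          · subst hbb
            rw [if_pos rfl, if_pos hp]
          · rw [if_neg hbb, if_neg ?_]
            intro hcontra
            exact hbb (pv_key_inj b b0 hbr.1 hb0.1
              (by rw [eq_of_beq hcontra, eq_of_beq hp]))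
    obtain ⟨hk', hv'⟩ := hstep
    obtain ⟨hk'', hv''⟩ := ih (pvBStep (pvIndex n) d p) hk'
    exact ⟨hk'', fun b hb => by rw [hv'' b hb, hv' b hb]⟩

-- ===== VERDICT (by name: the statement is the Claim_ definition above) =====
theorem get_batch_results_spec : Claim_equal_get_batch_results := by
  intro cs n _ _
  unfold Spec_get_batch_results get_batch_results get_batch_results_alt
  by_cases hn : n ≤ 0
  · rw [if_pos hn, pv_pvInit_items, PySem.List.pyRange_one_eq_nil hn]
    rfl
  · rw [if_neg hn]
    obtain ⟨hk, hv⟩ := pv_loop_inv n cs (pvInit n) (pv_pvInit_keys n)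
    rw [PySem.Dict.items_eq_map_keys _ (hk ▸ PySem.List.nodup_pyRange_one 0 n) (PySem.Dict.mk []),
      hk, List.map_map]
    refine (List.map_congr_left ?_).symm
    intro b hb
    rw [Function.comp_apply, hv b hb, pv_pvInit_getD]
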